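-- pv_equiv track=rewrite | github.com/joycao1/splash-hyena | carrots_merge_stream.py | filter_universal
-- ===== SOURCE A (Python) =====
-- from collections import defaultdict, Counter
--
-- def filter_universal(counts):
--     """
--     Remove (cbc,target) that appear in ALL anchors for that cbc (if >1 anchors).
--     Return new dict with same shape.
--     """
--     # map: cbc -> set(anchors), and cbc->target->anchors_count
--     anchors_by_cbc = defaultdict(set)
--     target_anchor_count = defaultdict(lambda: defaultdict(int))  # cbc -> target -> n_anchors
--     presence = defaultdict(lambda: defaultdict(set))  # cbc -> target -> set(anchors)
--
--     for (cbc, anchor, target), c in counts.items():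
--         anchors_by_cbc[cbc].add(anchor)
--         presence[cbc][target].add(anchor)
--
--     for cbc, targ_map in presence.items():
--         for target, anchors in targ_map.items():
--             target_anchor_count[cbc][target] = len(anchors)
--
--     # build filtered
--     filtered = {}
--     for (cbc, anchor, target), c in counts.items():
--         n_anchors = len(anchors_by_cbc[cbc])
--         if n_anchors > 1 and target_anchor_count[cbc][target] == n_anchors:
--             # universal across anchors for this CBC -> drop
--             continue
--         filtered[(cbc, anchor, target)] = c
--     return filtered
-- ===== SOURCE B (Python) =====
-- def filter_universal(counts):
--     """
--     Remove (cbc,target) that appear in ALL anchors for that cbc (if >1 anchors).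
--     Return new dict with same shape.
--     """
--     keys = set(counts)
--
--     def universal(cbc, target):
--         anchors = {a for (c, a, _t) in keys if c == cbc}
--         return len(anchors) > 1 and all((cbc, a, target) in keys for a in anchors)
--
--     return {k: c for k, c in counts.items() if not universal(k[0], k[2])}
-- ===== Notes on version B (the rewrite author's own statement) =====
-- stated objective: simpler
-- what changed: Replaces A's three staged passes (per-cbc anchor sets, nested presence dicts, rebuilt target_anchor_count table, then a length-comparison filter) with a direct definitional check: build the key set once and, per entry, test universality literally as 'every anchor of this cbc also carries this target' via set membership, with no per-(cbc,target) tables at all.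
import Mathlib
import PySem

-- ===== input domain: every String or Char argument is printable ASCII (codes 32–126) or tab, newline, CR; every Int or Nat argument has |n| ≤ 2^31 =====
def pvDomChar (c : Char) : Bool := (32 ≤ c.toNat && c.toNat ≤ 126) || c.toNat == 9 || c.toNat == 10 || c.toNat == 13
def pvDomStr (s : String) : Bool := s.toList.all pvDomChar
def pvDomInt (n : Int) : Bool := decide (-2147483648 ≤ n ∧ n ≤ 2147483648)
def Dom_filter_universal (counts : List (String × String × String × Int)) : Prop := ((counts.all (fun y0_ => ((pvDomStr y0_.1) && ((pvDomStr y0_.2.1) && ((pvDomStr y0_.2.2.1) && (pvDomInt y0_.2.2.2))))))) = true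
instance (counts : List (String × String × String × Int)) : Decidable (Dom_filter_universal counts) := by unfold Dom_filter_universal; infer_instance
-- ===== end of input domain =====

-- B replaces A's staged index tables by the direct definitional test against the key set
-- (simpler decomposition, no per-(cbc,target) tables; same returned dict).

-- ===== PORT A =====
-- Note: A's defaultdict reads (anchors_by_cbc[cbc], target_anchor_count[cbc][target]) in the
-- third loop hit keys that are always present, so porting them as getD with the default is
-- exact for the returned value (the defaultdicts' insert-on-read mutation is not observable).
def filter_universal (counts : List (String × String × String × Int)) : List (String × String × String × Int) :=
  -- first loop: anchors_by_cbc and presence built together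
  let st := counts.foldl
    (fun (st : PySem.Dict String (PySem.Set String) × PySem.Dict String (PySem.Dict String (PySem.Set String))) kv =>
      (st.1.insert kv.1 (PySem.Set.add (st.1.getD kv.1 PySem.Set.empty) kv.2.1),
       st.2.insert kv.1 ((st.2.getD kv.1 PySem.Dict.empty).insert kv.2.2.1
         (PySem.Set.add ((st.2.getD kv.1 PySem.Dict.empty).getD kv.2.2.1 PySem.Set.empty) kv.2.1))))
    (PySem.Dict.empty, PySem.Dict.empty)
  let anchors_by_cbc := st.1
  let presence := st.2
  -- second loop: target_anchor_count[cbc][target] = len(anchors)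
  let target_anchor_count : PySem.Dict String (PySem.Dict String Int) :=
    presence.items.foldl (fun d p =>
      p.2.items.foldl (fun d q =>
        d.insert p.1 ((d.getD p.1 PySem.Dict.empty).insert q.1 ((PySem.Set.len q.2 : Int)))) d)
      PySem.Dict.empty
  -- third loop: build filtered
  let filtered : PySem.Dict (String × String × String) Int :=
    counts.foldl (fun f kv =>
      let n : Int := (PySem.Set.len (anchors_by_cbc.getD kv.1 PySem.Set.empty) : Int)
      if 1 < n ∧ (target_anchor_count.getD kv.1 PySem.Dict.empty).getD kv.2.2.1 0 = n then f
      else f.insert (kv.1, kv.2.1, kv.2.2.1) kv.2.2.2)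
      PySem.Dict.empty
  filtered.items.map (fun p => (p.1.1, p.1.2.1, p.1.2.2, p.2))

-- ===== PORT B =====
-- keys/anchors are consumed only through len / all / membership, which are order-independent,
-- so the Set model is exact here.
def filter_universal_alt (counts : List (String × String × String × Int)) : List (String × String × String × Int) :=
  -- keys = set(counts)
  let keys : PySem.Set (String × String × String) :=
    PySem.Set.ofList (counts.map (fun kv => (kv.1, kv.2.1, kv.2.2.1)))
  -- def universal(cbc, target): ...
  let universal : String → String → Bool := fun cbc target =>
    let anchors : PySem.Set String :=
      PySem.Set.ofList ((keys.filter (fun k => k.1 == cbc)).map (fun k => k.2.1))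
    decide (1 < PySem.Set.len anchors) &&
      anchors.all (fun a => PySem.Set.contains keys (cbc, a, target))
  -- {k: c for k, c in counts.items() if not universal(k[0], k[2])}
  let filtered : PySem.Dict (String × String × String) Int :=
    counts.foldl (fun f kv =>
      if universal kv.1 kv.2.2.1 then f
      else f.insert (kv.1, kv.2.1, kv.2.2.1) kv.2.2.2)
      PySem.Dict.empty
  filtered.items.map (fun p => (p.1.1, p.1.2.1, p.1.2.2, p.2))

-- ===== PRECONDITION & SPEC =====
def Spec_filter_universal (counts : List (String × String × String × Int)) (out : List (String × String × String × Int)) : Prop := out = filter_universal_alt counts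
instance (counts : List (String × String × String × Int)) (out : List (String × String × String × Int)) : Decidable (Spec_filter_universal counts out) := by unfold Spec_filter_universal; infer_instance

-- ===== CLAIM (what is proved, stated in full; the proofs are below) =====
def Claim_equal_filter_universal : Prop := ∀ (counts : List (String × String × String × Int)), Dom_filter_universal counts → Spec_filter_universal counts (filter_universal counts)

-- ===== LEMMAS AND PROOFS =====
-- step functions (proof helpers)
abbrev anchStep (d : PySem.Dict String (PySem.Set String)) (kv : String × String × String × Int) :
    PySem.Dict String (PySem.Set String) :=
  d.insert kv.1 (PySem.Set.add (d.getD kv.1 PySem.Set.empty) kv.2.1)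

abbrev presStep (d : PySem.Dict String (PySem.Dict String (PySem.Set String)))
    (kv : String × String × String × Int) : PySem.Dict String (PySem.Dict String (PySem.Set String)) :=
  d.insert kv.1 ((d.getD kv.1 PySem.Dict.empty).insert kv.2.2.1
    (PySem.Set.add ((d.getD kv.1 PySem.Dict.empty).getD kv.2.2.1 PySem.Set.empty) kv.2.1))

abbrev tanStep (d : PySem.Dict (String × String) (PySem.Set String))
    (kv : String × String × String × Int) : PySem.Dict (String × String) (PySem.Set String) :=
  d.insert (kv.1, kv.2.2.1) (PySem.Set.add (d.getD (kv.1, kv.2.2.1) PySem.Set.empty) kv.2.1)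

-- Lemma 1: nested presence lookup = pair-keyed lookup
theorem pres_eq_tan (counts : List (String × String × String × Int))
    (d1 : PySem.Dict String (PySem.Dict String (PySem.Set String)))
    (d2 : PySem.Dict (String × String) (PySem.Set String))
    (h : ∀ c t, (d1.getD c PySem.Dict.empty).getD t ([] : PySem.Set String) = d2.getD (c, t) ([] : PySem.Set String)) :
    ∀ c t, ((counts.foldl presStep d1).getD c PySem.Dict.empty).getD t ([] : PySem.Set String)
      = (counts.foldl tanStep d2).getD (c, t) ([] : PySem.Set String) := by
  induction counts generalizing d1 d2 with
  | nil => exact h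
  | cons kv rest ih =>
    refine ih _ _ ?_
    intro c t
    simp only [presStep, tanStep, PySem.Dict.getD_insert]
    by_cases hc : c = kv.1
    · subst hc
      by_cases ht : t = kv.2.2.1
      · subst ht; simp [h]
      · simp [PySem.Dict.getD_insert, ht, Prod.ext_iff, h]
    · simp [hc, Prod.ext_iff, h]

abbrev flatStep (m : PySem.Dict String Int) (q : String × PySem.Set String) : PySem.Dict String Int :=
  m.insert q.1 ((PySem.Set.len q.2 : Int))

abbrev tacStep (d : PySem.Dict String (PySem.Dict String Int))
    (p : String × PySem.Dict String (PySem.Set String)) : PySem.Dict String (PySem.Dict String Int) :=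
  p.2.items.foldl (fun d q =>
    d.insert p.1 ((d.getD p.1 PySem.Dict.empty).insert q.1 ((PySem.Set.len q.2 : Int)))) d

theorem tacInner_getD (k : String) (items : List (String × PySem.Set String))
    (d : PySem.Dict String (PySem.Dict String Int)) (c t : String) :
    ((items.foldl (fun d q =>
        d.insert k ((d.getD k PySem.Dict.empty).insert q.1 ((PySem.Set.len q.2 : Int)))) d).getD c PySem.Dict.empty).getD t 0
      = if c = k then (items.foldl flatStep (d.getD k PySem.Dict.empty)).getD t 0
        else (d.getD c PySem.Dict.empty).getD t 0 := by
  induction items generalizing d with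
  | nil => split <;> simp_all
  | cons q rest ih =>
    simp only [List.foldl_cons, ih, PySem.Dict.getD_insert, flatStep]
    split <;> simp_all

theorem flatFold_getD_not_mem (items : List (String × PySem.Set String)) (m : PySem.Dict String Int)
    (t : String) (h : ∀ q ∈ items, q.1 ≠ t) :
    (items.foldl flatStep m).getD t 0 = m.getD t 0 := by
  induction items generalizing m with
  | nil => rfl
  | cons q rest ih =>
    simp only [List.foldl_cons, ih _ (fun q hq => h q (List.mem_cons_of_mem _ hq)), flatStep]
    rw [PySem.Dict.getD_insert]
    simp [Ne.symm (h q List.mem_cons_self)]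

theorem flatFold_getD (items : List (String × PySem.Set String)) (m : PySem.Dict String Int)
    (t : String) (hnd : (items.map Prod.fst).Nodup) :
    (items.foldl flatStep m).getD t 0
      = match items.find? (fun q => q.1 == t) with
        | some q => (PySem.Set.len q.2 : Int)
        | none => m.getD t 0 := by
  induction items generalizing m with
  | nil => rfl
  | cons q rest ih =>
    simp only [List.map_cons, List.nodup_cons] at hnd
    by_cases hq : q.1 = t
    · simp only [List.foldl_cons, List.find?_cons, hq, beq_self_eq_true]
      rw [flatFold_getD_not_mem]
      · simp [flatStep, hq, PySem.Dict.getD_insert_self]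
      · intro r hr hrt
        have : q.1 ∈ List.map Prod.fst rest := by
          have h1 : r.1 = q.1 := by rw [hrt, hq]
          exact h1 ▸ List.mem_map_of_mem hr
        exact hnd.1 this
    · have hb : (q.1 == t) = false := by simp [hq]
      simp only [List.foldl_cons, List.find?_cons, hb]
      rw [ih _ hnd.2]
      cases rest.find? (fun q => q.1 == t) <;>
        simp [flatStep, PySem.Dict.getD_insert, Ne.symm hq]

theorem tacFold_getD_not_mem (L : List (String × PySem.Dict String (PySem.Set String)))
    (d : PySem.Dict String (PySem.Dict String Int)) (c t : String) (h : ∀ p ∈ L, p.1 ≠ c) :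
    ((L.foldl tacStep d).getD c PySem.Dict.empty).getD t 0 = (d.getD c PySem.Dict.empty).getD t 0 := by
  induction L generalizing d with
  | nil => rfl
  | cons p rest ih =>
    simp only [List.foldl_cons, ih _ (fun p hp => h p (List.mem_cons_of_mem _ hp))]
    rw [tacStep, tacInner_getD]
    simp [Ne.symm (h p List.mem_cons_self)]

theorem tacFold_getD (L : List (String × PySem.Dict String (PySem.Set String)))
    (d : PySem.Dict String (PySem.Dict String Int)) (c t : String)
    (hnd : (L.map Prod.fst).Nodup) (hinner : ∀ p ∈ L, p.2.keys.Nodup) :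
    ((L.foldl tacStep d).getD c PySem.Dict.empty).getD t 0
      = match L.find? (fun p => p.1 == c) with
        | some p =>
          (match p.2.items.find? (fun q => q.1 == t) with
           | some q => (PySem.Set.len q.2 : Int)
           | none => (d.getD c PySem.Dict.empty).getD t 0)
        | none => (d.getD c PySem.Dict.empty).getD t 0 := by
  induction L generalizing d with
  | nil => rfl
  | cons p rest ih =>
    simp only [List.map_cons, List.nodup_cons] at hnd
    by_cases hp : p.1 = c
    · simp only [List.foldl_cons, List.find?_cons, hp, beq_self_eq_true]
      rw [tacFold_getD_not_mem]
      · rw [tacStep, tacInner_getD, if_pos hp.symm]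
        rw [flatFold_getD]
        · subst hp
          cases p.2.items.find? (fun q => q.1 == t) <;> simp
        · have := hinner p List.mem_cons_self
          simpa [PySem.Dict.keys] using this
      · intro r hr hrc
        have : p.1 ∈ List.map Prod.fst rest := by
          have h1 : r.1 = p.1 := by rw [hrc, hp]
          exact h1 ▸ List.mem_map_of_mem hr
        exact hnd.1 this
    · have hb : (p.1 == c) = false := by simp [hp]
      simp only [List.foldl_cons, List.find?_cons, hb]
      rw [ih _ hnd.2 (fun r hr => hinner r (List.mem_cons_of_mem _ hr))]
      have hgd : (((tacStep d p).getD c PySem.Dict.empty).getD t 0) = ((d.getD c PySem.Dict.empty).getD t 0) := by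
        rw [tacStep, tacInner_getD]; simp [Ne.symm hp]
      cases rest.find? (fun p => p.1 == c) with
      | none => exact hgd
      | some r => cases r.2.items.find? (fun q => q.1 == t) <;> simp [hgd]

theorem pres_keys_nodup (counts : List (String × String × String × Int)) :
    (counts.foldl presStep PySem.Dict.empty).keys.Nodup :=
  PySem.Dict.nodup_keys_foldl_insert_key counts (fun kv => kv.1) _ _ PySem.Dict.nodup_keys_empty

theorem pres_inner_nodup (counts : List (String × String × String × Int))
    (d1 : PySem.Dict String (PySem.Dict String (PySem.Set String)))
    (h : ∀ c, (d1.getD c PySem.Dict.empty).keys.Nodup) :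
    ∀ c, ((counts.foldl presStep d1).getD c PySem.Dict.empty).keys.Nodup := by
  induction counts generalizing d1 with
  | nil => exact h
  | cons kv rest ih =>
    refine ih _ ?_
    intro c
    rw [presStep, PySem.Dict.getD_insert]
    split
    · exact PySem.Dict.nodup_keys_insert _ _ _ (h kv.1)
    · exact h c

theorem tac_eq_len (counts : List (String × String × String × Int)) (c t : String) :
    (((counts.foldl presStep PySem.Dict.empty).items.foldl tacStep PySem.Dict.empty).getD c PySem.Dict.empty).getD t 0
    = (PySem.Set.len (((counts.foldl presStep PySem.Dict.empty).getD c PySem.Dict.empty).getD t ([] : PySem.Set String)) : Int) := by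
  have hknd : (counts.foldl presStep PySem.Dict.empty).keys.Nodup := pres_keys_nodup counts
  have hnd : (((counts.foldl presStep PySem.Dict.empty).items).map Prod.fst).Nodup := by
    simpa [PySem.Dict.keys] using hknd
  have hinodup := pres_inner_nodup counts PySem.Dict.empty (by simp [PySem.Dict.getD_empty, PySem.Dict.keys_empty])
  have hinner : ∀ p ∈ (counts.foldl presStep PySem.Dict.empty).items, p.2.keys.Nodup := by
    intro p hp
    have : (counts.foldl presStep PySem.Dict.empty).getD p.1 PySem.Dict.empty = p.2 :=
      PySem.Dict.getD_of_mem_items _ (by simpa using hp) hknd _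
    rw [← this]; exact hinodup p.1
  rw [tacFold_getD _ _ _ _ hnd hinner]
  cases hfind : (counts.foldl presStep PySem.Dict.empty).items.find? (fun p => p.1 == c) with
  | none =>
    have hnc : (counts.foldl presStep PySem.Dict.empty).contains c = false := by
      rw [PySem.Dict.contains_eq_decide_mem_keys]
      simp only [decide_eq_false_iff_not]
      intro hmem
      simp only [PySem.Dict.keys, List.mem_map] at hmem
      obtain ⟨p, hp, hpc⟩ := hmem
      have := List.find?_eq_none.mp hfind p hp
      simp [hpc] at this
    rw [PySem.Dict.getD_of_not_contains _ PySem.Dict.empty hnc]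
    simp [PySem.Dict.getD_empty]
  | some p =>
    have hpmem : p ∈ (counts.foldl presStep PySem.Dict.empty).items := List.mem_of_find?_eq_some hfind
    have hpc : p.1 = c := by
      have := List.find?_some hfind; simpa using this
    have hgd : (counts.foldl presStep PySem.Dict.empty).getD c PySem.Dict.empty = p.2 := by
      rw [← hpc]
      exact PySem.Dict.getD_of_mem_items _ (by simpa using hpmem) hknd _
    rw [hgd]
    cases hqf : p.2.items.find? (fun q => q.1 == t) with
    | none =>
      have hnt : p.2.contains t = false := by
        rw [PySem.Dict.contains_eq_decide_mem_keys]
        simp only [decide_eq_false_iff_not]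
        intro hmem
        simp only [PySem.Dict.keys, List.mem_map] at hmem
        obtain ⟨q, hq, hqt⟩ := hmem
        have := List.find?_eq_none.mp hqf q hq
        simp [hqt] at this
      rw [PySem.Dict.getD_of_not_contains _ ([] : PySem.Set String) hnt]
      simp [hqf]
    | some q =>
      have hqmem : q ∈ p.2.items := List.mem_of_find?_eq_some hqf
      have hqt : q.1 = t := by
        have := List.find?_some hqf; simpa using this
      have hggg : p.2.getD t ([] : PySem.Set String) = q.2 := by
        rw [← hqt]
        exact PySem.Dict.getD_of_mem_items _ (by simpa using hqmem) (hinner p hpmem) _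
      rw [hggg]
      simp [hqf]

-- ===== membership / nodup characterisations =====
theorem anch_mem (counts : List (String × String × String × Int))
    (d : PySem.Dict String (PySem.Set String)) (c : String) (x : String) :
    x ∈ (counts.foldl anchStep d).getD c PySem.Set.empty
      ↔ x ∈ d.getD c PySem.Set.empty ∨ ∃ kv ∈ counts, kv.1 = c ∧ kv.2.1 = x := by
  induction counts generalizing d with
  | nil => simp
  | cons kv rest ih =>
    simp only [List.foldl_cons, ih, anchStep, PySem.Dict.getD_insert, List.mem_cons]
    split_ifs with hc
    · subst hc
      simp only [PySem.Set.mem_add]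
      constructor
      · rintro (h | h)
        · rcases h with h | h
          · exact Or.inl h
          · exact Or.inr ⟨kv, Or.inl rfl, rfl, h.symm⟩
        · exact Or.inr (h.imp fun kv' hh => ⟨Or.inr hh.1, hh.2⟩)
      · rintro (h | ⟨kv', (rfl | hm), h1, h2⟩)
        · exact Or.inl (Or.inl h)
        · exact Or.inl (Or.inr h2.symm)
        · exact Or.inr ⟨kv', hm, h1, h2⟩
    · constructor
      · rintro (h | h)
        · exact Or.inl h
        · exact Or.inr (h.imp fun kv' hh => ⟨Or.inr hh.1, hh.2⟩)
      · rintro (h | ⟨kv', (rfl | hm), h1, h2⟩)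
        · exact Or.inl h
        · exact absurd h1.symm hc
        · exact Or.inr ⟨kv', hm, h1, h2⟩

theorem tan_mem (counts : List (String × String × String × Int))
    (d : PySem.Dict (String × String) (PySem.Set String)) (c t : String) (x : String) :
    x ∈ (counts.foldl tanStep d).getD (c, t) PySem.Set.empty
      ↔ x ∈ d.getD (c, t) PySem.Set.empty ∨ ∃ kv ∈ counts, kv.1 = c ∧ kv.2.2.1 = t ∧ kv.2.1 = x := by
  induction counts generalizing d with
  | nil => simp
  | cons kv rest ih =>
    simp only [List.foldl_cons, ih, tanStep, PySem.Dict.getD_insert, List.mem_cons]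
    split_ifs with hc
    · rw [Prod.ext_iff] at hc
      obtain ⟨hc1, hc2⟩ := hc
      subst hc1; subst hc2
      simp only [PySem.Set.mem_add]
      constructor
      · rintro (h | h)
        · rcases h with h | h
          · exact Or.inl h
          · exact Or.inr ⟨kv, Or.inl rfl, rfl, rfl, h.symm⟩
        · exact Or.inr (h.imp fun kv' hh => ⟨Or.inr hh.1, hh.2⟩)
      · rintro (h | ⟨kv', (rfl | hm), h1, h2, h3⟩)
        · exact Or.inl (Or.inl h)
        · exact Or.inl (Or.inr h3.symm)
        · exact Or.inr ⟨kv', hm, h1, h2, h3⟩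
    · constructor
      · rintro (h | h)
        · exact Or.inl h
        · exact Or.inr (h.imp fun kv' hh => ⟨Or.inr hh.1, hh.2⟩)
      · rintro (h | ⟨kv', (rfl | hm), h1, h2, h3⟩)
        · exact Or.inl h
        · exact absurd (by rw [h1, h2]) hc
        · exact Or.inr ⟨kv', hm, h1, h2, h3⟩

theorem anch_nodup (counts : List (String × String × String × Int))
    (d : PySem.Dict String (PySem.Set String)) (h : ∀ c, (d.getD c PySem.Set.empty).Nodup) :
    ∀ c, ((counts.foldl anchStep d).getD c PySem.Set.empty).Nodup := by
  induction counts generalizing d with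
  | nil => exact h
  | cons kv rest ih =>
    refine ih _ ?_
    intro c
    rw [anchStep, PySem.Dict.getD_insert]
    split
    · exact PySem.Set.nodup_add _ _ (h kv.1)
    · exact h c

theorem tan_nodup (counts : List (String × String × String × Int))
    (d : PySem.Dict (String × String) (PySem.Set String)) (h : ∀ k, (d.getD k PySem.Set.empty).Nodup) :
    ∀ k, ((counts.foldl tanStep d).getD k PySem.Set.empty).Nodup := by
  induction counts generalizing d with
  | nil => exact h
  | cons kv rest ih =>
    refine ih _ ?_
    intro k
    rw [tanStep, PySem.Dict.getD_insert]
    split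
    · exact PySem.Set.nodup_add _ _ (h _)
    · exact h k

theorem len_eq_iff_superset {α : Type} [DecidableEq α] (P S : List α)
    (hP : P.Nodup) (hS : S.Nodup) (hsub : ∀ x ∈ P, x ∈ S) :
    (P.length = S.length) ↔ ∀ a ∈ S, a ∈ P := by
  constructor
  · intro hlen a haS
    have hfs : P.toFinset ⊆ S.toFinset := by
      intro y hy
      exact List.mem_toFinset.mpr (hsub y (List.mem_toFinset.mp hy))
    have hcard : S.toFinset.card ≤ P.toFinset.card := by
      rw [List.toFinset_card_of_nodup hP, List.toFinset_card_of_nodup hS, hlen]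
    have := Finset.eq_of_subset_of_card_le hfs hcard
    exact List.mem_toFinset.mp (this ▸ List.mem_toFinset.mpr haS)
  · intro hsup
    have hperm : List.Perm P S := (List.perm_ext_iff_of_nodup hP hS).mpr
      (fun a => ⟨fun h => hsub a h, fun h => hsup a h⟩)
    exact hperm.length_eq

theorem nodup_len_eq_of_mem_iff {α : Type} [DecidableEq α] (P S : List α)
    (hP : P.Nodup) (hS : S.Nodup) (h : ∀ x, x ∈ P ↔ x ∈ S) : P.length = S.length :=
  ((List.perm_ext_iff_of_nodup hP hS).mpr h).length_eq

theorem altAnch_mem (counts : List (String × String × String × Int)) (c x : String) :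
    x ∈ PySem.Set.ofList (((PySem.Set.ofList (counts.map (fun kv => (kv.1, kv.2.1, kv.2.2.1)))).filter
          (fun k => k.1 == c)).map (fun k => k.2.1))
      ↔ ∃ kv ∈ counts, kv.1 = c ∧ kv.2.1 = x := by
  simp only [PySem.Set.mem_ofList, List.mem_map, List.mem_filter, beq_iff_eq]
  constructor
  · rintro ⟨k, ⟨hk, hkc⟩, hkx⟩
    obtain ⟨kv, hkv, rfl⟩ := hk
    exact ⟨kv, hkv, hkc, hkx⟩
  · rintro ⟨kv, hkv, h1, h2⟩
    exact ⟨(kv.1, kv.2.1, kv.2.2.1), ⟨⟨kv, hkv, rfl⟩, h1⟩, h2⟩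

theorem keys_mem (counts : List (String × String × String × Int)) (c a t : String) :
    (c, a, t) ∈ PySem.Set.ofList (counts.map (fun kv => (kv.1, kv.2.1, kv.2.2.1)))
      ↔ ∃ kv ∈ counts, kv.1 = c ∧ kv.2.2.1 = t ∧ kv.2.1 = a := by
  simp only [PySem.Set.mem_ofList, List.mem_map, Prod.ext_iff]
  constructor
  · rintro ⟨kv, hkv, h1, h2, h3⟩
    exact ⟨kv, hkv, h1, h3, h2⟩
  · rintro ⟨kv, hkv, h1, h2, h3⟩
    exact ⟨kv, hkv, h1, h3, h2⟩

theorem set_len_eq (l : List String) : PySem.Set.len l = (l.length : Int) := by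
  simp [PySem.Set.len]

-- the two filter conditions agree
theorem cond_iff (counts : List (String × String × String × Int)) (c t : String) :
    ((1 : Int) < (PySem.Set.len ((counts.foldl anchStep PySem.Dict.empty).getD c PySem.Set.empty) : Int)
      ∧ ((PySem.Set.len ((counts.foldl tanStep PySem.Dict.empty).getD (c, t) PySem.Set.empty) : Int)
          = (PySem.Set.len ((counts.foldl anchStep PySem.Dict.empty).getD c PySem.Set.empty) : Int)))
      ↔ ((decide (1 < PySem.Set.len (PySem.Set.ofList (((PySem.Set.ofList (counts.map (fun kv => (kv.1, kv.2.1, kv.2.2.1)))).filter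
              (fun k => k.1 == c)).map (fun k => k.2.1)))) &&
          (PySem.Set.ofList (((PySem.Set.ofList (counts.map (fun kv => (kv.1, kv.2.1, kv.2.2.1)))).filter
              (fun k => k.1 == c)).map (fun k => k.2.1))).all
            (fun a => PySem.Set.contains (PySem.Set.ofList (counts.map (fun kv => (kv.1, kv.2.1, kv.2.2.1)))) (c, a, t))) = true) := by
  set S := (counts.foldl anchStep PySem.Dict.empty).getD c PySem.Set.empty with hSdef
  set P := (counts.foldl tanStep PySem.Dict.empty).getD (c, t) PySem.Set.empty with hPdef
  set S' := PySem.Set.ofList (((PySem.Set.ofList (counts.map (fun kv => (kv.1, kv.2.1, kv.2.2.1)))).filter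
      (fun k => k.1 == c)).map (fun k => k.2.1)) with hS'def
  have hSmem : ∀ x, x ∈ S ↔ ∃ kv ∈ counts, kv.1 = c ∧ kv.2.1 = x := by
    intro x; rw [hSdef, anch_mem]; simp [PySem.Dict.getD_empty]
  have hPmem : ∀ x, x ∈ P ↔ ∃ kv ∈ counts, kv.1 = c ∧ kv.2.2.1 = t ∧ kv.2.1 = x := by
    intro x; rw [hPdef, tan_mem]; simp [PySem.Dict.getD_empty]
  have hS'mem : ∀ x, x ∈ S' ↔ ∃ kv ∈ counts, kv.1 = c ∧ kv.2.1 = x := fun x => altAnch_mem counts c x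
  have hSnd : S.Nodup := anch_nodup counts PySem.Dict.empty (by simp [PySem.Dict.getD_empty]) c
  have hPnd : P.Nodup := tan_nodup counts PySem.Dict.empty (by simp [PySem.Dict.getD_empty]) (c, t)
  have hS'nd : S'.Nodup := PySem.Set.nodup_ofList _
  have hlenSS' : S.length = S'.length :=
    nodup_len_eq_of_mem_iff S S' hSnd hS'nd (fun x => (hSmem x).trans (hS'mem x).symm)
  have hPsub : ∀ x ∈ P, x ∈ S' := by
    intro x hx
    obtain ⟨kv, hkv, h1, _h2, h3⟩ := (hPmem x).mp hx
    exact (hS'mem x).mpr ⟨kv, hkv, h1, h3⟩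
  rw [set_len_eq S, set_len_eq P, set_len_eq S']
  simp only [Bool.and_eq_true, decide_eq_true_eq, List.all_eq_true, PySem.Set.contains_iff]
  constructor
  · rintro ⟨h1, h2⟩
    have h1' : (1 : Int) < (S'.length : Int) := by rw [← hlenSS']; exact h1
    refine ⟨h1', ?_⟩
    intro a haS'
    have hlen : P.length = S'.length := by
      have : P.length = S.length := by exact_mod_cast h2
      omega
    have hPS' : ∀ a ∈ S', a ∈ P := (len_eq_iff_superset P S' hPnd hS'nd hPsub).mp hlen
    obtain ⟨kv, hkv, hh1, hh2, hh3⟩ := (hPmem a).mp (hPS' a haS')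
    exact (keys_mem counts c a t).mpr ⟨kv, hkv, hh1, hh2, hh3⟩
  · rintro ⟨h1, h2⟩
    have h1' : (1 : Int) < (S.length : Int) := by rw [hlenSS']; exact h1
    refine ⟨h1', ?_⟩
    have hsup : ∀ a ∈ S', a ∈ P := by
      intro a haS'
      obtain ⟨kv, hkv, hh1, hh2, hh3⟩ := (keys_mem counts c a t).mp (h2 a haS')
      exact (hPmem a).mpr ⟨kv, hkv, hh1, hh2, hh3⟩
    have hlen : P.length = S'.length := (len_eq_iff_superset P S' hPnd hS'nd hPsub).mpr hsup
    have : P.length = S.length := by omega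
    exact_mod_cast this

theorem main_eq (counts : List (String × String × String × Int)) :
    filter_universal counts = filter_universal_alt counts := by
  simp only [filter_universal, filter_universal_alt]
  rw [PySem.List.foldl_prod_mk
        (f := fun (d : PySem.Dict String (PySem.Set String)) (kv : String × String × String × Int) =>
          d.insert kv.1 ((d.getD kv.1 PySem.Set.empty).add kv.2.1))
        (g := fun (d : PySem.Dict String (PySem.Dict String (PySem.Set String))) (kv : String × String × String × Int) =>
          d.insert kv.1 ((d.getD kv.1 PySem.Dict.empty).insert kv.2.2.1
            (((d.getD kv.1 PySem.Dict.empty).getD kv.2.2.1 PySem.Set.empty).add kv.2.1)))]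
  refine congrArg _ (congrArg _ ?_)
  refine PySem.List.foldl_congr_mem _ _ _ _ ?_
  intro acc kv _hkv
  dsimp only
  rw [tac_eq_len counts kv.1 kv.2.2.1]
  rw [pres_eq_tan counts PySem.Dict.empty PySem.Dict.empty
        (by intro c t; simp [PySem.Dict.getD_empty]) kv.1 kv.2.2.1]
  exact if_congr (cond_iff counts kv.1 kv.2.2.1) rfl rfl

-- ===== VERDICT (by name: the statement is the Claim_ definition above) =====
theorem filter_universal_spec : Claim_equal_filter_universal := by
  intro counts _
  unfold Spec_filter_universal
  exact main_eq counts
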